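-- pv_equiv track=rewrite | github.com/kako-jun/nesfetch | tools/create_chr_from_logos.py | create_tile_from_pattern
-- ===== SOURCE A (Python) =====
-- def create_tile_from_pattern(pattern):
--     """Convert 8x8 ASCII pattern to NES tile format (16 bytes)"""
--     # pattern should be list of 8 strings, each 8 chars
--     # Characters: ' ' = transparent/black, any other = white/colored
--     plane0 = []
--     plane1 = []
--
--     for row in pattern:
--         byte0 = 0
--         byte1 = 0
--         for i, char in enumerate(row[:8]):
--             if char != ' ' and char != '.':
--                 # Set pixel (both planes for color 3 = brightest)
--                 byte0 |= (1 << (7 - i))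
--                 byte1 |= (1 << (7 - i))
--         plane0.append(byte0)
--         plane1.append(byte1)
--
--     return plane0 + plane1
-- ===== SOURCE B (Python) =====
-- def create_tile_from_pattern(pattern):
--     """Convert 8x8 ASCII pattern to NES tile format (16 bytes)"""
--     # Both planes are identical (color 3), so compute one plane and return it twice.
--     planes = [
--         int(''.join('0' if c in ' .' else '1' for c in row[:8]).ljust(8, '0'), 2)
--         for row in pattern
--     ]
--     return planes + planes
-- ===== Notes on version B (the rewrite author's own statement) =====
-- stated objective: simpler
-- what changed: B collapses the two identical parallel plane accumulators into a single per-row byte, computed by building an 8-char right-padded bit-string and parsing it with int(s,2) instead of shift-and-OR accumulation, returning planes + planes.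
import Mathlib
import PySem

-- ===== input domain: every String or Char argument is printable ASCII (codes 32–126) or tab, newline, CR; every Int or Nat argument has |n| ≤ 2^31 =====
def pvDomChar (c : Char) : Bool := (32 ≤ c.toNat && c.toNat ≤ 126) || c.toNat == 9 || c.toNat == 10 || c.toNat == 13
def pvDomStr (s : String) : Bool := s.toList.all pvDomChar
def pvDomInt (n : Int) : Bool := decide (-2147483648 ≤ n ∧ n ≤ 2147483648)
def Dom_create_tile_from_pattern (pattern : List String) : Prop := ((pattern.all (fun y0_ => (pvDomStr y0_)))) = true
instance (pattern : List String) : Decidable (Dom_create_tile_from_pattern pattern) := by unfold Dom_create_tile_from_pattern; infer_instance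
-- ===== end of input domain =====

-- B computes one plane (a padded bit-string parsed with int(s,2)) and returns it twice: simpler.


-- ===== PORT A =====
-- inner loop: for i, char in enumerate(row[:8]) with the two accumulators byte0, byte1
def pvRowBytes : List Char → Nat → Int → Int → Int × Int
  | [], _, b0, b1 => (b0, b1)
  | c :: cs, i, b0, b1 =>
    if c ≠ ' ' ∧ c ≠ '.' then
      pvRowBytes cs (i + 1) (PySem.Int.bor b0 ((1 : Int) <<< (7 - i)))
                            (PySem.Int.bor b1 ((1 : Int) <<< (7 - i)))
    else
      pvRowBytes cs (i + 1) b0 b1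

-- outer loop: for row in pattern, appending to plane0 / plane1
def pvPlanesLoop : List String → List Int → List Int → List Int × List Int
  | [], p0, p1 => (p0, p1)
  | row :: rest, p0, p1 =>
    -- row[:8] with nonnegative bound = take 8 (exact)
    let st := pvRowBytes (row.toList.take 8) 0 0 0
    pvPlanesLoop rest (p0 ++ [st.1]) (p1 ++ [st.2])

def create_tile_from_pattern (pattern : List String) : List Int :=
  let pl := pvPlanesLoop pattern [] []
  pl.1 ++ pl.2

-- ===== PORT B =====
-- per-row byte: bit-string of row[:8], ljust(8,'0'), int(_, 2)
def pvRowByte (row : String) : Int :=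
  let s := (row.toList.take 8).map (fun c => if c = ' ' ∨ c = '.' then '0' else '1')
  let padded := s ++ List.replicate (8 - s.length) '0'   -- .ljust(8, '0')
  (PySem.Int.ofCharsBase? padded 2).getD 0   -- int(_, 2); never none: padded is binary digits

def create_tile_from_pattern_alt (pattern : List String) : List Int :=
  let planes := pattern.map pvRowByte
  planes ++ planes

-- ===== PRECONDITION & SPEC =====
def Spec_create_tile_from_pattern (pattern : List String) (out : List Int) : Prop := out = create_tile_from_pattern_alt pattern
instance (pattern : List String) (out : List Int) : Decidable (Spec_create_tile_from_pattern pattern out) := by unfold Spec_create_tile_from_pattern; infer_instance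

-- ===== CLAIM (what is proved, stated in full; the proofs are below) =====
def Claim_equal_create_tile_from_pattern : Prop := ∀ (pattern : List String), Dom_create_tile_from_pattern pattern → Spec_create_tile_from_pattern pattern (create_tile_from_pattern pattern)

-- ===== LEMMAS AND PROOFS =====

-- whether a character is blank (' ' or '.')
def pvBlank (c : Char) : Bool := decide (c = ' ' ∨ c = '.')

-- A's inner loop, factored through the blank-pattern of the row
def pvRowBytesB : List Bool → Nat → Int → Int → Int × Int
  | [], _, b0, b1 => (b0, b1)
  | b :: bs, i, b0, b1 =>
    if b = false then
      pvRowBytesB bs (i + 1) (PySem.Int.bor b0 ((1 : Int) <<< (7 - i)))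
                             (PySem.Int.bor b1 ((1 : Int) <<< (7 - i)))
    else
      pvRowBytesB bs (i + 1) b0 b1

-- B's byte as a function of the blank-pattern
def pvByteB (bs : List Bool) : Int :=
  (PySem.Int.ofCharsBase?
    (bs.map (fun b => if b then '0' else '1') ++ List.replicate (8 - bs.length) '0') 2).getD 0

lemma pvFactorA (cs : List Char) : ∀ (i : Nat) (b0 b1 : Int),
    pvRowBytes cs i b0 b1 = pvRowBytesB (cs.map pvBlank) i b0 b1 := by
  induction cs with
  | nil => intro i b0 b1; rfl
  | cons c cs ih =>
    intro i b0 b1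
    by_cases h : c = ' ' ∨ c = '.'
    · have h1 : ¬ (c ≠ ' ' ∧ c ≠ '.') := by tauto
      simp [pvRowBytes, pvRowBytesB, pvBlank, h, h1, ih]
    · have h1 : c ≠ ' ' ∧ c ≠ '.' := by tauto
      simp [pvRowBytes, pvRowBytesB, pvBlank, h1, ih]

lemma pvFactorB (row : String) :
    pvRowByte row = pvByteB ((row.toList.take 8).map pvBlank) := by
  unfold pvRowByte pvByteB
  have hmap : (row.toList.take 8).map (fun c => if c = ' ' ∨ c = '.' then '0' else '1')
      = ((row.toList.take 8).map pvBlank).map (fun b => if b then '0' else '1') := by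
    rw [List.map_map]
    apply List.map_congr_left
    intro c _
    by_cases h : c = ' ' ∨ c = '.' <;> simp [pvBlank, h]
  simp [hmap]

lemma pvKey (bs : List Bool) (h : bs.length ≤ 8) :
    pvRowBytesB bs 0 0 0 = (pvByteB bs, pvByteB bs) := by
  match bs with
  | [] => decide
  | [a] => revert a; decide
  | [a,b] => revert a b; decide
  | [a,b,c] => revert a b c; decide
  | [a,b,c,d] => revert a b c d; decide
  | [a,b,c,d,e] => revert a b c d e; decide
  | [a,b,c,d,e,f] => revert a b c d e f; decide
  | [a,b,c,d,e,f,g] => revert a b c d e f g; decide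
  | [a,b,c,d,e,f,g,i] => revert a b c d e f g i; decide
  | a::b::c::d::e::f::g::i::j::rest => simp at h; omega

lemma pvRowEq (row : String) :
    pvRowBytes (row.toList.take 8) 0 0 0 = (pvRowByte row, pvRowByte row) := by
  rw [pvFactorA, pvFactorB]
  apply pvKey
  simp

lemma pvPlanesEq (l : List String) : ∀ (p0 p1 : List Int),
    pvPlanesLoop l p0 p1 = (p0 ++ l.map pvRowByte, p1 ++ l.map pvRowByte) := by
  induction l with
  | nil => intro p0 p1; simp [pvPlanesLoop]
  | cons row rest ih =>
    intro p0 p1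
    simp only [pvPlanesLoop, pvRowEq, ih, List.map_cons]
    simp

-- ===== VERDICT (by name: the statement is the Claim_ definition above) =====
theorem create_tile_from_pattern_spec : Claim_equal_create_tile_from_pattern := by
  intro pattern _
  unfold Spec_create_tile_from_pattern create_tile_from_pattern create_tile_from_pattern_alt
  simp [pvPlanesEq]
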